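-- pv_equiv track=rewrite | github.com/fabiomigueldp/Algoritmos_Lista6 | FMDP-Alg-06-Ex-09.py | classificar_numeros
-- ===== SOURCE A (Python) =====
-- def classificar_numeros(numeros, media):
--     abaixo_da_media = []
--     igual_a_media = []
--     acima_da_media = []
--
--     for numero in numeros:
--         if numero < media:
--             abaixo_da_media.append(numero)
--         elif numero > media:
--             acima_da_media.append(numero)
--         else:
--             igual_a_media.append(numero)
--
--     return abaixo_da_media, igual_a_media, acima_da_media
-- ===== SOURCE B (Python) =====
-- def classificar_numeros(numeros, media):
--     numeros = list(numeros)
--     abaixo = [n for n in numeros if n < media]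
--     igual = [n for n in numeros if n == media]
--     acima = [n for n in numeros if n > media]
--     return abaixo, igual, acima
-- ===== Notes on version B (the rewrite author's own statement) =====
-- stated objective: idiomatic
-- what changed: Replaces the single accumulating loop with three independent filtering passes (list comprehensions), one per bucket.
import Mathlib
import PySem

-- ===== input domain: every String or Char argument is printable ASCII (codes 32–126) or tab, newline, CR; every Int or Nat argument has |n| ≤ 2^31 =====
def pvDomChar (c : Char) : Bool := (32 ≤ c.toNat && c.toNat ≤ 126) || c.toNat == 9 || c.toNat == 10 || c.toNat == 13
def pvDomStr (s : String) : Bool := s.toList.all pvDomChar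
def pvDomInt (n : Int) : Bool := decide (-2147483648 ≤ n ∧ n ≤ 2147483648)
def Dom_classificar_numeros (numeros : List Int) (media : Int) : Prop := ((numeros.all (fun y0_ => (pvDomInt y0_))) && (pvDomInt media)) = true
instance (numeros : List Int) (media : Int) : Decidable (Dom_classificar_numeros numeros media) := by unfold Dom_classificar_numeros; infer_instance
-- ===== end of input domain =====

-- B replaces A's single accumulating loop with three independent filtering passes (idiomatic; same cost).


-- ===== PORT A =====
-- Single pass: fold over numeros maintaining the three accumulators (Python lists = Arrays; append = push).
def classificar_numeros (numeros : List Int) (media : Int) : List Int × List Int × List Int :=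
  let st := numeros.foldl (fun (st : Array Int × Array Int × Array Int) numero =>
    let (abaixo, igual, acima) := st
    if numero < media then (abaixo.push numero, igual, acima)
    else if numero > media then (abaixo, igual, acima.push numero)
    else (abaixo, igual.push numero, acima)) (#[], #[], #[])
  (st.1.toList, st.2.1.toList, st.2.2.toList)

-- ===== PORT B =====
-- Three independent filtering passes, one per bucket.
def classificar_numeros_alt (numeros : List Int) (media : Int) : List Int × List Int × List Int :=
  (numeros.filter (fun n => n < media),
   numeros.filter (fun n => n == media),
   numeros.filter (fun n => n > media))

-- ===== PRECONDITION & SPEC =====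
def Spec_classificar_numeros (numeros : List Int) (media : Int) (out : List Int × List Int × List Int) : Prop := out = classificar_numeros_alt numeros media
instance (numeros : List Int) (media : Int) (out : List Int × List Int × List Int) : Decidable (Spec_classificar_numeros numeros media out) := by unfold Spec_classificar_numeros; infer_instance

-- ===== CLAIM (what is proved, stated in full; the proofs are below) =====
def Claim_equal_classificar_numeros : Prop := ∀ (numeros : List Int) (media : Int), Dom_classificar_numeros numeros media → Spec_classificar_numeros numeros media (classificar_numeros numeros media)

-- ===== LEMMAS AND PROOFS =====

-- Loop invariant: the fold starting from accumulators (a, i, c) ends with each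
-- accumulator extended by the corresponding filter of the remaining input.
theorem classificar_fold_inv (numeros : List Int) (media : Int)
    (a i c : Array Int) :
    let st := numeros.foldl (fun (st : Array Int × Array Int × Array Int) numero =>
      let (abaixo, igual, acima) := st
      if numero < media then (abaixo.push numero, igual, acima)
      else if numero > media then (abaixo, igual, acima.push numero)
      else (abaixo, igual.push numero, acima)) (a, i, c)
    st.1.toList = a.toList ++ numeros.filter (fun n => n < media) ∧
    st.2.1.toList = i.toList ++ numeros.filter (fun n => n == media) ∧
    st.2.2.toList = c.toList ++ numeros.filter (fun n => n > media) := by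
  induction numeros generalizing a i c with
  | nil => simp
  | cons x xs ih =>
    simp only [List.foldl_cons, List.filter_cons]
    by_cases h1 : x < media
    · have h3 : (x == media) = false := by simp; omega
      obtain ⟨e1, e2, e3⟩ := ih (a.push x) i c
      simp only [if_pos h1]
      refine ⟨?_, ?_, ?_⟩ <;>
        (simp [e1, e2, e3, Array.toList_push, h1, h3]; try omega)
    · by_cases h2 : x > media
      · have h3 : (x == media) = false := by simp; omega
        obtain ⟨e1, e2, e3⟩ := ih a i (c.push x)
        simp only [if_neg h1, if_pos h2]
        refine ⟨?_, ?_, ?_⟩ <;>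
          (simp [e1, e2, e3, Array.toList_push, h1, h2, h3]; try omega)
      · have h3 : (x == media) = true := by simp; omega
        obtain ⟨e1, e2, e3⟩ := ih a (i.push x) c
        simp only [if_neg h1, if_neg h2]
        refine ⟨?_, ?_, ?_⟩ <;>
          (simp [e1, e2, e3, Array.toList_push, h1, h2, h3]; try omega)

-- ===== VERDICT (by name: the statement is the Claim_ definition above) =====
theorem classificar_numeros_spec : Claim_equal_classificar_numeros := by
  intro numeros media _
  unfold Spec_classificar_numeros classificar_numeros classificar_numeros_alt
  simp [classificar_fold_inv numeros media #[] #[] #[]]
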